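-- pv_equiv track=rewrite | github.com/HamzaFarhan/pronto_gen | core_lib/video_utils.py | get_clip_lens
-- ===== SOURCE A (Python) =====
-- def get_clip_lens(num_clips=6, duration=30):
--     clips = [1]*(num_clips)
--     idx = 0
--     while sum(clips) < duration:
--         if idx > len(clips)-1:
--             idx = 0
--         clips[idx]+=1
--         idx+=1
--     return clips
-- ===== SOURCE B (Python) =====
-- def get_clip_lens(num_clips=6, duration=30):
--     if num_clips <= 0:
--         return []
--     extra = max(0, duration - num_clips)
--     q, r = divmod(extra, num_clips)
--     return [q + 2] * r + [q + 1] * (num_clips - r)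
-- ===== Notes on version B (the rewrite author's own statement) =====
-- stated objective: alternative
-- what changed: Replaced the one-second-at-a-time round-robin while loop by a closed-form divmod split: every clip gets 1 + extra//num_clips and the first extra%num_clips clips get one more.
import Mathlib
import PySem

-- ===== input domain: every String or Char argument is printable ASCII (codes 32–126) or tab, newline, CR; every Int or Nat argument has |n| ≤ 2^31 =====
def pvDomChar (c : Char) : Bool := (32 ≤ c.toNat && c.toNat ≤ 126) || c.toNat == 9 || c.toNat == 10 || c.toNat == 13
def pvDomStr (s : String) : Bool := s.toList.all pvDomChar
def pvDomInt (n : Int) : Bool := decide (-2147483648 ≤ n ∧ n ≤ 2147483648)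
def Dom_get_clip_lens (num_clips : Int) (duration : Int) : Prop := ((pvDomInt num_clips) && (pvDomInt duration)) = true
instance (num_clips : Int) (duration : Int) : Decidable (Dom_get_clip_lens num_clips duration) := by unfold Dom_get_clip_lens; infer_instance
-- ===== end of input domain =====

-- B replaces A's one-second-at-a-time round-robin while loop by a closed-form divmod split.

-- ===== PORT A =====
-- the while loop of A; each iteration adds 1 to one clip. 'fuel' is only a totality guard:
-- get_clip_lens passes exactly the number of iterations the Python loop performs,
-- (duration - sum clips).toNat, so the fuel never runs out on any input.
-- On empty clips with sum < duration, Python raises IndexError (excluded by Pre_); the port returns the list there.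
def pvLoopA (fuel : Nat) (duration : Int) (clips : List Int) (idx : Int) : List Int :=
  match fuel with
  | 0 => clips
  | fuel + 1 =>
    if clips.sum < duration then
      if clips.length = 0 then clips  -- Python: IndexError (outside Pre_)
      else
        let i : Int := if idx > (clips.length : Int) - 1 then 0 else idx
        pvLoopA fuel duration (clips.set i.toNat (clips.getD i.toNat 0 + 1)) (i + 1)
    else clips

def get_clip_lens (num_clips : Int) (duration : Int) : List Int :=
  pvLoopA (duration - (List.replicate num_clips.toNat 1).sum).toNat duration
    (List.replicate num_clips.toNat 1) 0

-- ===== PORT B =====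
def get_clip_lens_alt (num_clips : Int) (duration : Int) : List Int :=
  if num_clips ≤ 0 then []
  else
    let extra := max 0 (duration - num_clips)
    let q := PySem.Int.floordiv extra num_clips
    let r := PySem.Int.mod extra num_clips
    List.replicate r.toNat (q + 2) ++ List.replicate (num_clips - r).toNat (q + 1)

-- ===== PRECONDITION & SPEC =====
-- Pre_ excludes exactly the inputs on which A raises IndexError (num_clips ≤ 0 with duration > 0: the while loop indexes clips[0] on the empty list); A returns normally everywhere else.
def Pre_get_clip_lens (num_clips : Int) (duration : Int) : Prop :=
  1 ≤ num_clips ∨ duration ≤ 0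
instance (num_clips : Int) (duration : Int) : Decidable (Pre_get_clip_lens num_clips duration) := by
  unfold Pre_get_clip_lens; infer_instance
def pvWitness_get_clip_lens : Int × Int := (6, 30)

def Spec_get_clip_lens (num_clips : Int) (duration : Int) (out : List Int) : Prop := out = get_clip_lens_alt num_clips duration
instance (num_clips : Int) (duration : Int) (out : List Int) : Decidable (Spec_get_clip_lens num_clips duration out) := by unfold Spec_get_clip_lens; infer_instance

-- ===== CLAIM (what is proved, stated in full; the proofs are below) =====
def Claim_equal_get_clip_lens : Prop := ∀ (num_clips : Int) (duration : Int), Dom_get_clip_lens num_clips duration → Pre_get_clip_lens num_clips duration → Spec_get_clip_lens num_clips duration (get_clip_lens num_clips duration)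
-- ===== LEMMAS AND PROOFS =====

-- one round-robin increment, expressed on the invariant shape
theorem pvSetStep (k m : Nat) (v : Int) :
    (List.replicate k (v+1) ++ List.replicate (m+1) v).set k (v+1)
      = List.replicate (k+1) (v+1) ++ List.replicate m v := by
  rw [List.replicate_succ, List.set_append_right _ _ (by simp), List.replicate_succ' (n := k)]
  simp

theorem pvGetDStep (k m : Nat) (v : Int) :
    (List.replicate k (v+1) ++ List.replicate (m+1) v).getD k 0 = v := by
  rw [List.replicate_succ, List.getD_eq_getElem?_getD, List.getElem?_append_right (by simp)]
  simp

theorem pvSumShape (n k : Nat) (v : Int) (hk : k ≤ n) :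
    (List.replicate k (v+1) ++ List.replicate (n-k) v).sum = (n:Int)*v + k := by
  simp only [List.sum_append, List.sum_replicate, nsmul_eq_mul]
  push_cast [Nat.cast_sub hk]
  ring

-- closed form of the invariant shape via division by n
theorem pvClosed (n k : Nat) (v : Int) (hn : 1 ≤ n) (hk : k ≤ n) :
    List.replicate ((((n:Int)*v + k) % n).toNat) (((n:Int)*v + k) / n + 1) ++
      List.replicate (((n:Int) - ((n:Int)*v + k) % n).toNat) (((n:Int)*v + k) / n)
    = List.replicate k (v+1) ++ List.replicate (n-k) v := by
  rcases Nat.lt_or_ge k n with hlt | hge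
  · have hmod : ((n:Int)*v + k) % n = k := by
      rw [add_comm, Int.add_mul_emod_self_left,
        Int.emod_eq_of_lt (Int.natCast_nonneg k) (by exact_mod_cast hlt)]
    have hdiv : ((n:Int)*v + k) / n = v := by
      rw [add_comm, Int.add_mul_ediv_left _ _ (by exact_mod_cast (by omega : n ≠ 0)),
        Int.ediv_eq_zero_of_lt (Int.natCast_nonneg k) (by exact_mod_cast hlt), zero_add]
    rw [hmod, hdiv, Int.toNat_natCast, show (((n:Int) - k)).toNat = n - k by omega]
  · have hke : k = n := le_antisymm hk hge
    subst hke
    have h1 : (k:Int)*v + k = (k:Int)*(v+1) := by ring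
    rw [h1, Int.mul_emod_right, Int.mul_ediv_cancel_left _ (by exact_mod_cast (by omega : k ≠ 0))]
    simp

-- Loop invariant: after each pass the list is k clips at v+1 followed by n-k clips at v,
-- with the index at k; the final list is the closed form at t = max sum duration.
theorem pvLoopA_eq : ∀ (e : Nat) (d : Int) (n k : Nat) (v : Int), 1 ≤ n → k ≤ n →
    (d - ((n:Int)*v + k)).toNat = e →
    pvLoopA e d (List.replicate k (v+1) ++ List.replicate (n-k) v) (k:Int) =
      List.replicate ((max ((n:Int)*v + k) d % n).toNat) (max ((n:Int)*v + k) d / n + 1) ++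
        List.replicate (((n:Int) - max ((n:Int)*v + k) d % n).toNat) (max ((n:Int)*v + k) d / n) := by
  intro e
  induction e with
  | zero =>
    intro d n k v hn hk he
    have hds : d ≤ (n:Int)*v + k := by omega
    rw [max_eq_left hds]
    exact (pvClosed n k v hn hk).symm
  | succ e ih =>
    intro d n k v hn hk he
    have hd : (n:Int)*v + k < d := by omega
    rw [pvLoopA, if_pos (by rw [pvSumShape n k v hk]; exact hd),
      if_neg (by simp; omega)]
    have hlen : (((List.replicate k (v+1) ++ List.replicate (n-k) v).length : Nat) : Int)
        = (n : Int) := by simp; omega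
    rcases Nat.lt_or_ge k n with hlt | hge
    · -- index in range: increment clip k, go to state (k+1, v)
      have hi : ¬ ((k:Int) > (((List.replicate k (v+1) ++ List.replicate (n-k) v).length : Nat) : Int) - 1) := by
        rw [hlen]; omega
      simp only [if_neg hi, Int.toNat_natCast]
      rw [show n - k = (n - k - 1) + 1 by omega, pvGetDStep, pvSetStep,
        show (k:Int) + 1 = (((k+1 : Nat) : Nat) : Int) by push_cast; ring,
        show n - k - 1 = n - (k+1) by omega]
      rw [ih d n (k+1) v hn (by omega) (by
        have hx : ((n:Int)*v + ((k+1 : Nat) : Int)) = ((n:Int)*v + k) + 1 := by push_cast; ring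
        rw [hx]
        generalize (n:Int)*v + (k:Int) = X at he hd ⊢
        omega)]
      have hmax : max ((n:Int)*v + ((k+1 : Nat):Int)) d = max ((n:Int)*v + (k:Int)) d := by
        push_cast
        generalize (n:Int)*v = X at hd ⊢
        omega
      rw [hmax]
    · -- index past the end: Python resets it to 0; state becomes (1, v+1)
      have hke : k = n := le_antisymm hk hge
      subst hke
      have hi : ((k:Int) > (((List.replicate k (v+1) ++ List.replicate (k-k) v).length : Nat) : Int) - 1) := by
        rw [hlen]; omega
      simp only [if_pos hi, Int.toNat_zero]
      rw [show k - k = 0 by omega]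
      have hshape : (List.replicate k (v+1) ++ List.replicate 0 v)
          = List.replicate 0 ((v+1)+1) ++ List.replicate ((k:Nat) - 0) ((v+1)) := by simp
      have hget : (List.replicate k (v+1) ++ List.replicate 0 v).getD 0 0 = v + 1 := by
        rw [show (0:Nat) = (0:Nat) by rfl, show List.replicate 0 v = List.replicate (0+0) v by rfl]
        rw [show (List.replicate k (v+1) ++ List.replicate 0 v)
            = List.replicate 0 ((v+1)+1) ++ List.replicate ((k-1)+1) (v+1) by
          simp [show (k-1)+1 = k by omega]]
        exact pvGetDStep 0 (k-1) (v+1)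
      rw [hget]
      have hset : (List.replicate k (v+1) ++ List.replicate 0 v).set 0 (v + 1 + 1)
          = List.replicate 1 ((v+1)+1) ++ List.replicate (k - 1) (v+1) := by
        rw [show (List.replicate k (v+1) ++ List.replicate 0 v)
            = List.replicate 0 ((v+1)+1) ++ List.replicate ((k-1)+1) (v+1) by
          simp [show (k-1)+1 = k by omega]]
        exact pvSetStep 0 (k-1) (v+1)
      rw [hset, show (0:Int) + 1 = (((1:Nat)) : Int) by norm_num]
      rw [ih d k 1 (v+1) hn (by omega) (by
        have hx : ((k:Int)*(v+1) + ((1 : Nat) : Int)) = ((k:Int)*v + k) + 1 := by push_cast; ring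
        rw [hx]
        generalize (k:Int)*v + (k:Int) = X at he hd ⊢
        omega)]
      have hmax : max ((k:Int)*(v+1) + ((1 : Nat):Int)) d = max ((k:Int)*v + (k:Int)) d := by
        have hx : ((k:Int)*(v+1) + ((1 : Nat) : Int)) = ((k:Int)*v + k) + 1 := by push_cast; ring
        rw [hx]
        generalize (k:Int)*v + (k:Int) = X at hd ⊢
        omega
      rw [hmax]

-- ===== VERDICT (by name: the statement is the Claim_ definition above) =====
theorem get_clip_lens_spec : Claim_equal_get_clip_lens := by
  intro n d _ hpre
  unfold Spec_get_clip_lens get_clip_lens get_clip_lens_alt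
  by_cases hn : n ≤ 0
  · have hd : d ≤ 0 := by rcases hpre with h | h <;> omega
    rw [if_pos hn, show n.toNat = 0 by omega,
      show (d - (List.replicate 0 (1:Int)).sum).toNat = 0 by simp; omega]
    rw [pvLoopA]
    simp
  · rw [if_neg hn]
    have hn1 : 1 ≤ n.toNat := by omega
    have hN : ((n.toNat : Nat) : Int) = n := by omega
    have h0 : List.replicate n.toNat (1:Int)
        = List.replicate 0 ((1:Int)+1) ++ List.replicate (n.toNat - 0) 1 := by simp
    have hloop := pvLoopA_eq ((d - ((n.toNat:Int)*1 + ((0:Nat):Int))).toNat) d n.toNat 0 1 hn1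
      (by omega) rfl
    rw [Nat.cast_zero] at hloop
    have hsum1 : (List.replicate n.toNat (1:Int)).sum = (n.toNat:Int)*1 + 0 := by
      norm_num [List.sum_replicate]
    rw [hsum1, h0, hloop]
    show _ =
      List.replicate (PySem.Int.mod (max 0 (d - n)) n).toNat
          (PySem.Int.floordiv (max 0 (d - n)) n + 2) ++
        List.replicate (n - PySem.Int.mod (max 0 (d - n)) n).toNat
          (PySem.Int.floordiv (max 0 (d - n)) n + 1)
    rw [hN]
    rw [PySem.Int.floordiv_eq_ediv_of_pos (by omega), PySem.Int.mod_eq_emod_of_pos (by omega)]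
    have ht : max (n*1 + 0) d = n + max 0 (d - n) := by omega
    rw [ht]
    have hmod : (n + max 0 (d-n)) % n = (max 0 (d-n)) % n := by
      rw [show n + max 0 (d-n) = max 0 (d-n) + n*1 by ring, Int.add_mul_emod_self_left]
    have hdiv : (n + max 0 (d-n)) / n = (max 0 (d-n)) / n + 1 := by
      rw [show n + max 0 (d-n) = max 0 (d-n) + n*1 by ring, Int.add_mul_ediv_left _ _ (by omega)]
    rw [hmod, hdiv]
    norm_num
    exact Or.inr (by ring)
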